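-- pv_equiv track=rewrite | github.com/kooten111/ChibiBooru | services/implication_service.py | _filter_suggestions
-- ===== SOURCE A (Python) =====
-- from typing import List, Dict, Tuple, Set
--
-- def _filter_suggestions(suggestions: List[Dict], pattern_type: str = None,
--                         source_categories: List[str] = None,
--                         implied_categories: List[str] = None) -> List[Dict]:
--     """Helper to filter detailed suggestions list."""
--     filtered = suggestions
--
--     # Pattern type filter
--     if pattern_type and pattern_type != 'all':
--         filtered = [s for s in filtered if s.get('pattern_type') == pattern_type]
--
--     # Source category filter
--     if source_categories and 'all' not in source_categories:
--         # Separate inclusions and exclusions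
--         exclusions = [c[1:] for c in source_categories if c.startswith('!')]
--         inclusions = [c for c in source_categories if not c.startswith('!')]
--
--         filtered = [
--             s for s in filtered
--             if (not inclusions or s.get('source_category', 'general') in inclusions)
--             and (not exclusions or s.get('source_category', 'general') not in exclusions)
--         ]
--
--     # Implied category filter
--     if implied_categories and 'all' not in implied_categories:
--         # Separate inclusions and exclusions
--         exclusions = [c[1:] for c in implied_categories if c.startswith('!')]
--         inclusions = [c for c in implied_categories if not c.startswith('!')]
--
--         filtered = [
--             s for s in filtered
--             if (not inclusions or s.get('implied_category', 'general') in inclusions)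
--             and (not exclusions or s.get('implied_category', 'general') not in exclusions)
--         ]
--
--     return filtered
-- ===== SOURCE B (Python) =====
-- def _filter_suggestions(suggestions, pattern_type=None,
--                         source_categories=None,
--                         implied_categories=None):
--     """Single-pass filter with precomputed inclusion/exclusion sets."""
--     pat = pattern_type if pattern_type and pattern_type != 'all' else None
--
--     def split(cats):
--         if cats and 'all' not in cats:
--             return (True,
--                     {c for c in cats if not c.startswith('!')},
--                     {c[1:] for c in cats if c.startswith('!')})
--         return (False, set(), set())
--
--     src_on, src_inc, src_exc = split(source_categories)
--     imp_on, imp_inc, imp_exc = split(implied_categories)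
--
--     if pat is None and not src_on and not imp_on:
--         return suggestions
--
--     def keep(s):
--         if pat is not None and s.get('pattern_type') != pat:
--             return False
--         if src_on:
--             v = s.get('source_category', 'general')
--             if (src_inc and v not in src_inc) or v in src_exc:
--                 return False
--         if imp_on:
--             v = s.get('implied_category', 'general')
--             if (imp_inc and v not in imp_inc) or v in imp_exc:
--                 return False
--         return True
--
--     return [s for s in suggestions if keep(s)]
-- ===== Notes on version B (the rewrite author's own statement) =====
-- stated objective: alternative
-- what changed: Replaces A's three sequential list-comprehension passes (each rebuilding the list) by one precomputation of the pattern flag and per-axis inclusion/exclusion sets followed by a single pass with a combined keep predicate (returning the input unchanged when no filter is active).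
import Mathlib
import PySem

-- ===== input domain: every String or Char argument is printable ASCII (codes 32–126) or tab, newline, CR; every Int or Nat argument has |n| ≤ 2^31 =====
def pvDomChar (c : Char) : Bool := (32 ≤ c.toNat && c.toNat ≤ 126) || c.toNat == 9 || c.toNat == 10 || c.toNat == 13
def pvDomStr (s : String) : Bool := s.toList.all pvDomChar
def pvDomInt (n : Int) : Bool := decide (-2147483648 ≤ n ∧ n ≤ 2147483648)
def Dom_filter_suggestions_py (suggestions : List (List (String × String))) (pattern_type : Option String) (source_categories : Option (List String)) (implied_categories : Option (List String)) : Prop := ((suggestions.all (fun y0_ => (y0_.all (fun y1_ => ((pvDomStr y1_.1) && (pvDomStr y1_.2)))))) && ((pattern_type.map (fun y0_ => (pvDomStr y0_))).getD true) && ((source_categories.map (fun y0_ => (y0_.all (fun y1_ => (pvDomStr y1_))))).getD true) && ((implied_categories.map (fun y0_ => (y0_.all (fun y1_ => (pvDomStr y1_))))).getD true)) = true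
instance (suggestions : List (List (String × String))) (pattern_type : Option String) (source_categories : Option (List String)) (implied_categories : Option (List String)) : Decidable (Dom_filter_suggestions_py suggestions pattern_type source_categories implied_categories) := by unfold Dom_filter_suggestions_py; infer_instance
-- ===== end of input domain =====

-- B replaces A's three sequential filtering passes by precomputed inclusion/exclusion sets and one
-- single pass with a combined keep predicate (alternative decomposition; same results).


-- shared helper: Python dict get on the association-list representation (first match)
def sget? (s : List (String × String)) (k : String) : Option String :=
  (PySem.Dict.mk s).get? k
def sgetD (s : List (String × String)) (k d : String) : String :=
  (PySem.Dict.mk s).getD k d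

-- ===== PORT A =====
-- literal transliteration: three conditional comprehension passes over `filtered`
def filter_suggestions_py (suggestions : List (List (String × String))) (pattern_type : Option String) (source_categories : Option (List String)) (implied_categories : Option (List String)) : List (List (String × String)) :=
  let filtered := suggestions
  -- Pattern type filter
  let filtered :=
    match pattern_type with
    | none => filtered
    | some pt =>
      if pt ≠ "" ∧ pt ≠ "all" then
        filtered.filter (fun s => sget? s "pattern_type" == some pt)
      else filtered
  -- Source category filter
  let filtered :=
    match source_categories with
    | none => filtered
    | some cats =>
      if cats ≠ [] ∧ "all" ∉ cats then
        let exclusions := (cats.filter (fun c => PySem.Str.startswith c "!")).map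
          (fun c => PySem.Str.slice c (some 1) none)
        let inclusions := cats.filter (fun c => !(PySem.Str.startswith c "!"))
        filtered.filter (fun s =>
          (decide (inclusions = []) || inclusions.contains (sgetD s "source_category" "general")) &&
          (decide (exclusions = []) || !(exclusions.contains (sgetD s "source_category" "general"))))
      else filtered
  -- Implied category filter
  let filtered :=
    match implied_categories with
    | none => filtered
    | some cats =>
      if cats ≠ [] ∧ "all" ∉ cats then
        let exclusions := (cats.filter (fun c => PySem.Str.startswith c "!")).map
          (fun c => PySem.Str.slice c (some 1) none)
        let inclusions := cats.filter (fun c => !(PySem.Str.startswith c "!"))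
        filtered.filter (fun s =>
          (decide (inclusions = []) || inclusions.contains (sgetD s "implied_category" "general")) &&
          (decide (exclusions = []) || !(exclusions.contains (sgetD s "implied_category" "general"))))
      else filtered
  filtered

-- ===== PORT B =====
-- precompute (active, inclusion set, exclusion set) for one category argument
def catSplit (cats? : Option (List String)) : Bool × PySem.Set String × PySem.Set String :=
  match cats? with
  | some cats =>
    if cats ≠ [] ∧ "all" ∉ cats then
      (true,
       PySem.Set.ofList (cats.filter (fun c => !(PySem.Str.startswith c "!"))),
       PySem.Set.ofList ((cats.filter (fun c => PySem.Str.startswith c "!")).map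
         (fun c => PySem.Str.slice c (some 1) none)))
    else (false, [], [])
  | none => (false, [], [])

-- one combined keep predicate (early-return chain of Source B)
def keepSugg (pat : Option String) (src imp : Bool × PySem.Set String × PySem.Set String)
    (s : List (String × String)) : Bool :=
  (match pat with
   | some pt => sget? s "pattern_type" == some pt
   | none => true) &&
  (if src.1 then
     let v := sgetD s "source_category" "general"
     !((!src.2.1.isEmpty && !src.2.1.contains v) || src.2.2.contains v)
   else true) &&
  (if imp.1 then
     let v := sgetD s "implied_category" "general"
     !((!imp.2.1.isEmpty && !imp.2.1.contains v) || imp.2.2.contains v)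
   else true)

def filter_suggestions_py_alt (suggestions : List (List (String × String))) (pattern_type : Option String) (source_categories : Option (List String)) (implied_categories : Option (List String)) : List (List (String × String)) :=
  let pat : Option String :=
    match pattern_type with
    | some pt => if pt ≠ "" ∧ pt ≠ "all" then some pt else none
    | none => none
  let src := catSplit source_categories
  let imp := catSplit implied_categories
  if pat = none ∧ src.1 = false ∧ imp.1 = false then suggestions
  else suggestions.filter (keepSugg pat src imp)

-- ===== PRECONDITION & SPEC =====
def Spec_filter_suggestions_py (suggestions : List (List (String × String))) (pattern_type : Option String) (source_categories : Option (List String)) (implied_categories : Option (List String)) (out : List (List (String × String))) : Prop := out = filter_suggestions_py_alt suggestions pattern_type source_categories implied_categories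
instance (suggestions : List (List (String × String))) (pattern_type : Option String) (source_categories : Option (List String)) (implied_categories : Option (List String)) (out : List (List (String × String))) : Decidable (Spec_filter_suggestions_py suggestions pattern_type source_categories implied_categories out) := by unfold Spec_filter_suggestions_py; infer_instance

-- ===== CLAIM (what is proved, stated in full; the proofs are below) =====
def Claim_equal_filter_suggestions_py : Prop := ∀ (suggestions : List (List (String × String))) (pattern_type : Option String) (source_categories : Option (List String)) (implied_categories : Option (List String)), Dom_filter_suggestions_py suggestions pattern_type source_categories implied_categories → Spec_filter_suggestions_py suggestions pattern_type source_categories implied_categories (filter_suggestions_py suggestions pattern_type source_categories implied_categories)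

-- ===== LEMMAS AND PROOFS =====

lemma set_contains_ofList (xs : List String) (v : String) :
    (PySem.Set.ofList xs).contains v = xs.contains v := by
  simp [PySem.Set.mem_ofList]

lemma set_isEmpty_ofList (xs : List String) :
    (PySem.Set.ofList xs).isEmpty = decide (xs = []) := by
  cases xs with
  | nil => simp [PySem.Set.ofList]
  | cons a l =>
    have ha : a ∈ PySem.Set.ofList (a :: l) := (PySem.Set.mem_ofList _ _).mpr (by simp)
    cases h : (PySem.Set.ofList (a :: l)) with
    | nil => simp [h] at ha
    | cons b m => simp

-- the per-axis predicates agree pointwise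
lemma cat_pred_eq (cats : List String) (v : String) :
    ((decide ((cats.filter (fun c => !(PySem.Str.startswith c "!"))) = []) ||
      (cats.filter (fun c => !(PySem.Str.startswith c "!"))).contains v) &&
     (decide (((cats.filter (fun c => PySem.Str.startswith c "!")).map
         (fun c => PySem.Str.slice c (some 1) none)) = []) ||
      !(((cats.filter (fun c => PySem.Str.startswith c "!")).map
         (fun c => PySem.Str.slice c (some 1) none)).contains v)))
    = !((!(PySem.Set.ofList (cats.filter (fun c => !(PySem.Str.startswith c "!")))).isEmpty &&
         !(PySem.Set.ofList (cats.filter (fun c => !(PySem.Str.startswith c "!")))).contains v) ||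
        (PySem.Set.ofList ((cats.filter (fun c => PySem.Str.startswith c "!")).map
           (fun c => PySem.Str.slice c (some 1) none))).contains v) := by
  rw [set_contains_ofList, set_contains_ofList, set_isEmpty_ofList]
  set inc := cats.filter (fun c => !(PySem.Str.startswith c "!")) with hinc
  set exc := (cats.filter (fun c => PySem.Str.startswith c "!")).map
      (fun c => PySem.Str.slice c (some 1) none) with hexc
  by_cases he : exc = []
  · rw [he]; simp
  · have h0 : decide (exc = []) = false := by simp [he]
    rw [h0]
    cases inc.contains v <;> cases exc.contains v <;> cases decide (inc = []) <;> simp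

set_option maxHeartbeats 2000000 in
theorem filter_suggestions_py_spec_aux (suggestions : List (List (String × String)))
    (pattern_type : Option String) (source_categories : Option (List String))
    (implied_categories : Option (List String)) :
    filter_suggestions_py suggestions pattern_type source_categories implied_categories
      = filter_suggestions_py_alt suggestions pattern_type source_categories implied_categories := by
  unfold filter_suggestions_py filter_suggestions_py_alt keepSugg catSplit
  cases pattern_type <;> cases source_categories <;> cases implied_categories <;>
    dsimp only <;> split_ifs <;>
    first
      | rfl
      | tauto
      | (simp_all; done)
      | (simp only [List.filter_filter]
         apply List.filter_congr
         intro x _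
         dsimp only
         simp only [cat_pred_eq]
         simp only [Bool.true_and, Bool.and_true, Bool.and_assoc, Bool.and_comm])

-- ===== VERDICT (by name: the statement is the Claim_ definition above) =====
theorem filter_suggestions_py_spec : Claim_equal_filter_suggestions_py := by
  intro s p sc ic _
  unfold Spec_filter_suggestions_py
  exact filter_suggestions_py_spec_aux s p sc ic
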